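-- pv_equiv track=rewrite | github.com/enhinnen/ResumeWeb | skillsFormatter.py | getItemTXT
-- ===== SOURCE A (Python) =====
-- S = 'skills'
--
-- T = 'technologies'
--
-- def getLinesPerItem(mode):
--     if mode == S or mode == T:
--         return 5
--
-- def getItemTXT(TXT, numberOfItems, mode):
--     itemTXT = [''] * numberOfItems
--     startIndex = 0
--     endIndex = 0
--     for itemIndex in range(numberOfItems):
--         newlines = 0
--         for TXTIndex in range(startIndex, len(TXT)):
--             if TXT[TXTIndex] == '\n':
--                 newlines += 1
--                 if newlines == getLinesPerItem(mode) - 1: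
--                     endIndex = TXTIndex
--                     itemTXT[itemIndex] = TXT[startIndex:endIndex]
--                     startIndex = endIndex + 2
--                     TXTIndex = len(TXT) + 1
--         itemTXT[itemIndex] += '\n'
--     return itemTXT
-- ===== SOURCE B (Python) =====
-- S = 'skills'
--
-- T = 'technologies'
--
-- def getLinesPerItem(mode):
--     if mode == S or mode == T:
--         return 5
--
-- def getItemTXT(TXT, numberOfItems, mode):
--     per = getLinesPerItem(mode)
--     items = []
--     start = 0
--     count = 0
--     i = 0
--     n = len(TXT)
--     while i < n and len(items) < numberOfItems:
--         if TXT[i] == '\n':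
--             count += 1
--             if count + 1 == per:
--                 items.append(TXT[start:i] + '\n')
--                 start = i + 2
--                 count = 0
--                 i += 1  # skip the character right after the separating newline
--         i += 1
--     items += ['\n'] * (numberOfItems - len(items))
--     return items
-- ===== Notes on version B (the rewrite author's own statement) =====
-- stated objective: faster
-- what changed: A rescans from each item's start to the very end of TXT for every item (the Python loop-variable assignment meant as a break has no effect); B makes one linear scan counting newlines, emitting an item at every 4th newline and padding the remainder with '\n'.
import Mathlib
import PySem

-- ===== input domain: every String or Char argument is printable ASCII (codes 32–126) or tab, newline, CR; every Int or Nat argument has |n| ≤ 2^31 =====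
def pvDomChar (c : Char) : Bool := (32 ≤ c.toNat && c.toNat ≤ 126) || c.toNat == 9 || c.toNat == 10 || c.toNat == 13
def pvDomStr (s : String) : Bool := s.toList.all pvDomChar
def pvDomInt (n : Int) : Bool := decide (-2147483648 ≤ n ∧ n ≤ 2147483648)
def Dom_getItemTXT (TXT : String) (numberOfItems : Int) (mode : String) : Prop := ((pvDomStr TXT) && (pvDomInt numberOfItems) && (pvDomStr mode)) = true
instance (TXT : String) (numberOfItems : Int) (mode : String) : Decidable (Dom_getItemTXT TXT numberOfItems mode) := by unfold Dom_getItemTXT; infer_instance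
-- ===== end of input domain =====

-- B replaces A's per-item rescan of the whole remaining text by one linear scan that
-- emits an item at every 4th newline (objective: asymptotically faster).

-- ===== PORT A =====
def pyGetLinesPerItem (mode : String) : Option Int :=
  if mode == "skills" || mode == "technologies" then some 5 else none

-- A's inner 'for TXTIndex in range(startIndex, len(TXT))' loop.  The Python assignment
-- 'TXTIndex = len(TXT) + 1' to the loop variable has no effect in Python (the range
-- iterator continues), so it is omitted; state = (newlines, startIndex, endIndex, item).
-- When getLinesPerItem(mode) is None, Python raises TypeError on 'None - 1'; those inputs
-- are outside Pre_; the port's comparison is simply false there.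
def getItemTXT_inner (cs : List Char) (L? : Option Int) :
    List Int → Int × Int × Int × List Char → Int × Int × Int × List Char
  | [], st => st
  | i :: is, (newlines, startIndex, endIndex, item) =>
    if PySem.List.pyGet? cs i == some '\n' then
      let newlines := newlines + 1
      if some newlines == L?.map (fun L => L - 1) then
        getItemTXT_inner cs L? is
          (newlines, i + 2, i, PySem.List.slice cs (some startIndex) (some i))
      else getItemTXT_inner cs L? is (newlines, startIndex, endIndex, item)
    else getItemTXT_inner cs L? is (newlines, startIndex, endIndex, item)

-- A's outer 'for itemIndex in range(numberOfItems)' loop; itemTXT[itemIndex] is written in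
-- index order, so the pre-filled list is built by appending; state = (startIndex, endIndex, acc).
def getItemTXT_outer (cs : List Char) (L? : Option Int) :
    Nat → Int × Int × List String → Int × Int × List String
  | 0, st => st
  | k + 1, (startIndex, endIndex, acc) =>
    let r := getItemTXT_inner cs L? (PySem.List.pyRange startIndex cs.length 1)
               (0, startIndex, endIndex, [])
    getItemTXT_outer cs L? k (r.2.1, r.2.2.1, acc ++ [String.ofList r.2.2.2 ++ "\n"])

def getItemTXT (TXT : String) (numberOfItems : Int) (mode : String) : List String :=
  (getItemTXT_outer TXT.toList (pyGetLinesPerItem mode) numberOfItems.toNat (0, 0, [])).2.2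

-- ===== PORT B =====
def altLinesPerItem (mode : String) : Option Int :=
  if mode == "skills" || mode == "technologies" then some 5 else none

-- Source B's while loop: one scan, ported on a fuel argument (i grows by at least 1 per
-- iteration, so fuel = len(TXT) suffices and the 0-fuel exit coincides with 'i < n' failing);
-- 'count + 1 == per' with per = None is False in Python.
def altLoop (cs : List Char) (per? : Option Int) (num : Int) :
    Nat → List String → Int → Int → Int → List String
  | 0, items, _, _, _ => items
  | fuel + 1, items, start, count, i =>
    if i < (cs.length : Int) ∧ (items.length : Int) < num then
      if PySem.List.pyGet? cs i == some '\n' then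
        let count := count + 1
        if some (count + 1) == per? then
          altLoop cs per? num fuel
            (items ++ [String.ofList (PySem.List.slice cs (some start) (some i)) ++ "\n"])
            (i + 2) 0 (i + 2)
        else altLoop cs per? num fuel items start count (i + 1)
      else altLoop cs per? num fuel items start count (i + 1)
    else items

def getItemTXT_alt (TXT : String) (numberOfItems : Int) (mode : String) : List String :=
  let items := altLoop TXT.toList (altLinesPerItem mode) numberOfItems TXT.toList.length [] 0 0 0
  items ++ List.replicate (numberOfItems - (items.length : Int)).toNat "\n"

-- ===== PRECONDITION & SPEC =====
-- Pre_ excludes exactly the inputs where A raises TypeError ('None - 1'): a mode other than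
-- 'skills'/'technologies' together with at least one item to produce and a newline in TXT.
def Pre_getItemTXT (TXT : String) (numberOfItems : Int) (mode : String) : Prop :=
  mode = "skills" ∨ mode = "technologies" ∨ numberOfItems ≤ 0 ∨ '\n' ∉ TXT.toList
instance (TXT : String) (numberOfItems : Int) (mode : String) : Decidable (Pre_getItemTXT TXT numberOfItems mode) := by unfold Pre_getItemTXT; infer_instance

def pvWitness_getItemTXT : String × Int × String := ("a\nb\nc\nd\ne\nf\ng\nh\n", 2, "skills")

def Spec_getItemTXT (TXT : String) (numberOfItems : Int) (mode : String) (out : List String) : Prop := out = getItemTXT_alt TXT numberOfItems mode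
instance (TXT : String) (numberOfItems : Int) (mode : String) (out : List String) : Decidable (Spec_getItemTXT TXT numberOfItems mode out) := by unfold Spec_getItemTXT; infer_instance

-- ===== CLAIM (what is proved, stated in full; the proofs are below) =====
def Claim_equal_getItemTXT : Prop := ∀ (TXT : String) (numberOfItems : Int) (mode : String), Dom_getItemTXT TXT numberOfItems mode → Pre_getItemTXT TXT numberOfItems mode → Spec_getItemTXT TXT numberOfItems mode (getItemTXT TXT numberOfItems mode)

-- ===== LEMMAS AND PROOFS =====

-- position of the k-th newline of cs at position ≥ s (positions as Python ints)
def pvFindK (cs : List Char) (s k : Int) : Option Int :=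
  if h : 0 ≤ s ∧ s < (cs.length : Int) then
    if cs[s.toNat]'(by omega) = '\n' then
      if k = 1 then some s else pvFindK cs (s + 1) (k - 1)
    else pvFindK cs (s + 1) k
  else none
termination_by ((cs.length : Int) - s).toNat
decreasing_by all_goals omega

-- the common reference result: k items, item text starting at s0, scan at s, c newlines seen
def pvR (cs : List Char) (s0 c s : Int) : Nat → List String
  | 0 => []
  | k + 1 =>
    match pvFindK cs s (4 - c) with
    | some p => (String.ofList (PySem.List.slice cs (some s0) (some p)) ++ "\n")
                  :: pvR cs (p + 2) 0 (p + 2) k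
    | none => List.replicate (k + 1) "\n"

theorem pvFindK_none (cs : List Char) (s k : Int) (hs : (cs.length : Int) ≤ s) :
    pvFindK cs s k = none := by
  rw [pvFindK]
  have h : ¬ (0 ≤ s ∧ s < (cs.length : Int)) := by omega
  rw [dif_neg h]

theorem pvFindK_bounds (cs : List Char) :
    ∀ (fuel : Nat) (s k p : Int), ((cs.length : Int) - s).toNat ≤ fuel →
    pvFindK cs s k = some p → s ≤ p ∧ p < (cs.length : Int) := by
  intro fuel
  induction fuel with
  | zero =>
    intro s k p hf h
    rw [pvFindK_none cs s k (by omega)] at h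
    exact absurd h (by simp)
  | succ f ih =>
    intro s k p hf h
    rw [pvFindK] at h
    by_cases hin : 0 ≤ s ∧ s < (cs.length : Int)
    · rw [dif_pos hin] at h
      split at h
      · split at h
        · obtain rfl : s = p := by injection h
          omega
        · have := ih (s + 1) (k - 1) p (by omega) h; omega
      · have := ih (s + 1) k p (by omega) h; omega
    · rw [dif_neg hin] at h
      exact absurd h (by simp)

theorem inner_frozen (cs : List Char) (is : List Int) (c : Int) (hc : 4 ≤ c)
    (rest : Int × Int × List Char) :
    (getItemTXT_inner cs (some 5) is (c, rest)).2 = rest := by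
  induction is generalizing c with
  | nil => rfl
  | cons i is ih =>
    obtain ⟨s0, e, it⟩ := rest
    simp only [getItemTXT_inner]
    by_cases hg : (PySem.List.pyGet? cs i == some '\n') = true
    · rw [if_pos hg]
      have hne : ¬ (some (c + 1) == Option.map (fun L => L - 1) (some (5:Int))) = true := by
        simp; omega
      rw [if_neg hne]
      exact ih (c + 1) (by omega)
    · rw [if_neg hg]
      exact ih c hc

theorem inner_spec (cs : List Char) :
    ∀ (fuel : Nat) (s c s0 e : Int) (it : List Char), 0 ≤ s → 0 ≤ c → c < 4 →
    ((cs.length : Int) - s).toNat ≤ fuel →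
    (getItemTXT_inner cs (some 5) (PySem.List.pyRange s cs.length 1) (c, s0, e, it)).2
      = (match pvFindK cs s (4 - c) with
         | some p => (p + 2, p, PySem.List.slice cs (some s0) (some p))
         | none => (s0, e, it)) := by
  intro fuel
  induction fuel with
  | zero =>
    intro s c s0 e it hs hc0 hc4 hf
    rw [PySem.List.pyRange_one_eq_nil (by omega), pvFindK_none cs s _ (by omega)]
    rfl
  | succ f ih =>
    intro s c s0 e it hs hc0 hc4 hf
    by_cases hlt : s < (cs.length : Int)
    · rw [PySem.List.pyRange_one_cons hlt]
      have hget : PySem.List.pyGet? cs s = some (cs[s.toNat]'(by omega)) :=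
        PySem.List.pyGet?_eq_some_getElem cs hs hlt
      simp only [getItemTXT_inner]
      rw [pvFindK, dif_pos (⟨hs, hlt⟩ : 0 ≤ s ∧ s < (cs.length : Int))]
      by_cases hnl : cs[s.toNat]'(by omega) = '\n'
      · rw [if_pos (by simp [hget, hnl]), if_pos hnl]
        by_cases h3 : c = 3
        · subst h3
          rw [if_pos (by decide : (some ((3:Int) + 1) == Option.map (fun L => L - 1) (some (5:Int))) = true)]
          rw [if_pos (by norm_num : (4:Int) - 3 = 1)]
          exact inner_frozen cs _ 4 (by omega) _
        · rw [if_neg (by simp; omega : ¬ (some (c + 1) == Option.map (fun L => L - 1) (some (5:Int))) = true)]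
          rw [if_neg (by omega : ¬ ((4:Int) - c = 1))]
          rw [ih (s + 1) (c + 1) s0 e it (by omega) (by omega) (by omega) (by omega)]
          rw [show (4:Int) - c - 1 = 4 - (c + 1) by ring]
      · rw [if_neg (by simp [hget, hnl]), if_neg hnl]
        exact ih (s + 1) c s0 e it (by omega) hc0 hc4 (by omega)
    · rw [PySem.List.pyRange_one_eq_nil (by omega), pvFindK_none cs s _ (by omega)]
      rfl

theorem outer_spec (cs : List Char) :
    ∀ (k : Nat) (s0 e : Int) (acc : List String), 0 ≤ s0 →
    (getItemTXT_outer cs (some 5) k (s0, e, acc)).2.2 = acc ++ pvR cs s0 0 s0 k := by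
  intro k
  induction k with
  | zero => intro s0 e acc _; simp [getItemTXT_outer, pvR]
  | succ k ih =>
    intro s0 e acc hs0
    simp only [getItemTXT_outer]
    rw [inner_spec cs (((cs.length : Int) - s0).toNat) s0 0 s0 e [] hs0 (by omega) (by omega)
        (le_refl _)]
    rw [show (4:Int) - 0 = 4 by norm_num]
    cases hp : pvFindK cs s0 4 with
    | some p =>
      have hb := pvFindK_bounds cs (((cs.length : Int) - s0).toNat) s0 4 p (le_refl _) hp
      simp only
      rw [ih (p + 2) p _ (by omega)]
      simp [pvR, hp, List.append_assoc]
    | none =>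
      simp only
      rw [ih s0 e _ hs0]
      have hR : ∀ m : Nat, pvR cs s0 0 s0 m = List.replicate m "\n" := by
        intro m
        cases m with
        | zero => simp [pvR]
        | succ m => simp [pvR, hp]
      have hmk : String.ofList ([] : List Char) ++ "\n" = "\n" := by decide
      simp [hmk, hR, List.replicate_succ, List.append_assoc]

theorem alt_spec (cs : List Char) (num : Int) :
    ∀ (fuel : Nat) (items : List String) (s0 c i : Int), 0 ≤ i → 0 ≤ c → c < 4 →
    ((cs.length : Int) - i).toNat ≤ fuel →
    altLoop cs (some 5) num fuel items s0 c i
      ++ List.replicate (num - ((altLoop cs (some 5) num fuel items s0 c i).length : Int)).toNat "\n"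
      = items ++ pvR cs s0 c i (num - (items.length : Int)).toNat := by
  intro fuel
  induction fuel with
  | zero =>
    intro items s0 c i hi hc0 hc4 hf
    simp only [altLoop]
    cases hK : (num - (items.length : Int)).toNat with
    | zero => simp [pvR]
    | succ K =>
      rw [pvR, pvFindK_none cs i _ (by omega)]
  | succ f ih =>
    intro items s0 c i hi hc0 hc4 hf
    simp only [altLoop]
    by_cases hcond : i < (cs.length : Int) ∧ ((items.length : Int) < num)
    · rw [if_pos hcond]
      have hget : PySem.List.pyGet? cs i = some (cs[i.toNat]'(by omega)) :=
        PySem.List.pyGet?_eq_some_getElem cs hi hcond.1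
      obtain ⟨K, hK⟩ : ∃ K, (num - (items.length : Int)).toNat = K + 1 :=
        ⟨(num - (items.length : Int)).toNat - 1, by omega⟩
      by_cases hnl : cs[i.toNat]'(by omega) = '\n'
      · rw [if_pos (by simp [hget, hnl])]
        by_cases h3 : c = 3
        · subst h3
          rw [if_pos (by decide : (some ((3:Int) + 1 + 1) == some (5:Int)) = true)]
          rw [ih _ (i + 2) 0 (i + 2) (by omega) (by omega) (by omega) (by omega)]
          rw [show ((num - (((items ++ [String.ofList (PySem.List.slice cs (some s0) (some i)) ++ "\n"]).length : Int))).toNat) = K by simp; omega]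
          rw [hK, pvR]
          have hstep : pvFindK cs i (4 - 3) = some i := by
            rw [pvFindK, dif_pos (⟨hi, hcond.1⟩ : 0 ≤ i ∧ i < (cs.length : Int)),
                if_pos hnl, if_pos (by norm_num : (4:Int) - 3 = 1)]
          rw [hstep]
          simp [List.append_assoc]
        · rw [if_neg (by simp; omega : ¬ (some (c + 1 + 1) == some (5:Int)) = true)]
          rw [ih items s0 (c + 1) (i + 1) (by omega) (by omega) (by omega) (by omega)]
          have hstep : pvFindK cs i (4 - c) = pvFindK cs (i + 1) (4 - (c + 1)) := by
            rw [pvFindK, dif_pos (⟨hi, hcond.1⟩ : 0 ≤ i ∧ i < (cs.length : Int)),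
                if_pos hnl, if_neg (by omega : ¬ ((4:Int) - c = 1))]
            rw [show (4:Int) - c - 1 = 4 - (c + 1) by ring]
          rw [hK]
          cases hp : pvFindK cs (i + 1) (4 - (c + 1)) with
          | some p => simp [pvR, hstep, hp]
          | none => simp [pvR, hstep, hp]
      · rw [if_neg (by simp [hget, hnl])]
        rw [ih items s0 c (i + 1) (by omega) hc0 hc4 (by omega)]
        have hstep : pvFindK cs i (4 - c) = pvFindK cs (i + 1) (4 - c) := by
          rw [pvFindK, dif_pos (⟨hi, hcond.1⟩ : 0 ≤ i ∧ i < (cs.length : Int)), if_neg hnl]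
        rw [hK]
        cases hp : pvFindK cs (i + 1) (4 - c) with
        | some p => simp [pvR, hstep, hp]
        | none => simp [pvR, hstep, hp]
    · rw [if_neg hcond]
      cases hK : (num - (items.length : Int)).toNat with
      | zero => simp [pvR]
      | succ K =>
        rw [pvR, pvFindK_none cs i _ (by omega)]

-- no-newline lemmas (the invalid-mode inputs Pre_ still admits)
theorem inner_nonl (cs : List Char) (L? : Option Int) (hnl : '\n' ∉ cs) :
    ∀ (is : List Int) (st : Int × Int × Int × List Char),
    getItemTXT_inner cs L? is st = st := by
  intro is
  induction is with
  | nil => intro st; rfl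
  | cons i is ih =>
    intro st
    obtain ⟨c, s0, e, it⟩ := st
    simp only [getItemTXT_inner]
    by_cases hg : (PySem.List.pyGet? cs i == some '\n') = true
    · exact absurd (PySem.List.mem_of_pyGet?_eq_some cs (by simpa using hg)) hnl
    · rw [if_neg hg]
      exact ih _

theorem outer_nonl (cs : List Char) (L? : Option Int) (hnl : '\n' ∉ cs) :
    ∀ (k : Nat) (s0 e : Int) (acc : List String),
    (getItemTXT_outer cs L? k (s0, e, acc)).2.2 = acc ++ List.replicate k "\n" := by
  intro k
  induction k with
  | zero => intro s0 e acc; simp [getItemTXT_outer]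
  | succ k ih =>
    intro s0 e acc
    simp only [getItemTXT_outer]
    rw [inner_nonl cs L? hnl]
    rw [ih]
    have hmk : String.ofList ([] : List Char) ++ "\n" = "\n" := by decide
    simp [hmk, List.replicate_succ, List.append_assoc]

theorem alt_nonl (cs : List Char) (per? : Option Int) (num : Int) (hnl : '\n' ∉ cs) :
    ∀ (fuel : Nat) (items : List String) (s0 c i : Int),
    altLoop cs per? num fuel items s0 c i = items := by
  intro fuel
  induction fuel with
  | zero => intro items s0 c i; rfl
  | succ f ih =>
    intro items s0 c i
    simp only [altLoop]
    by_cases hcond : i < (cs.length : Int) ∧ ((items.length : Int) < num)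
    · rw [if_pos hcond]
      have hg : ¬ (PySem.List.pyGet? cs i == some '\n') = true := by
        simp only [beq_iff_eq]
        intro hg
        exact hnl (PySem.List.mem_of_pyGet?_eq_some cs hg)
      rw [if_neg hg]
      exact ih items s0 c (i + 1)
    · rw [if_neg hcond]

theorem alt_neg (cs : List Char) (per? : Option Int) (num : Int) (hnum : num ≤ 0)
    (fuel : Nat) (items : List String) (s0 c i : Int) :
    altLoop cs per? num fuel items s0 c i = items := by
  cases fuel with
  | zero => rfl
  | succ f =>
    simp only [altLoop]
    rw [if_neg (by omega : ¬ (i < (cs.length : Int) ∧ ((items.length : Int) < num)))]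

-- ===== VERDICT (by name: the statement is the Claim_ definition above) =====
theorem getItemTXT_spec : Claim_equal_getItemTXT := by
  intro TXT num mode _ hpre
  unfold Spec_getItemTXT getItemTXT
  simp only [getItemTXT_alt]
  by_cases hm : mode = "skills" ∨ mode = "technologies"
  · have hL : pyGetLinesPerItem mode = some 5 := by
      rcases hm with h | h <;> subst h <;> rfl
    have hL' : altLinesPerItem mode = some 5 := by
      rcases hm with h | h <;> subst h <;> rfl
    rw [hL, hL']
    rw [outer_spec TXT.toList num.toNat 0 0 [] (le_refl 0)]
    rw [alt_spec TXT.toList num TXT.toList.length [] 0 0 0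
        (le_refl 0) (by omega) (by omega) (by omega)]
    simp
  · have hrest : num ≤ 0 ∨ '\n' ∉ TXT.toList := by
      unfold Pre_getItemTXT at hpre; tauto
    rcases hrest with hnum | hnl
    · have h0 : num.toNat = 0 := by omega
      rw [h0]
      rw [alt_neg TXT.toList (altLinesPerItem mode) num hnum TXT.toList.length [] 0 0 0]
      simp [getItemTXT_outer]
      omega
    · rw [outer_nonl TXT.toList (pyGetLinesPerItem mode) hnl num.toNat 0 0 []]
      rw [alt_nonl TXT.toList (altLinesPerItem mode) num hnl TXT.toList.length [] 0 0 0]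
      simp
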